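-- pv_equiv track=rewrite | github.com/Marcos-asmj/Simulador_catraca | main.py | calcular_total
-- ===== SOURCE A (Python) =====
-- def calcular_total (lista):
--     total_torcedores = 0
--     total_casa = 0
--     total_visitante = 0
--
--     for item in lista:
--         total_torcedores = total_torcedores + item[0]
--         total_casa = total_casa + item[1]
--         total_visitante = total_visitante + item[2]
--
--     return total_torcedores, total_casa, total_visitante
-- ===== SOURCE B (Python) =====
-- def calcular_total(lista):
--     # divide-and-conquer: split the list in half, total each half recursively,
--     # then add the two partial triples componentwise
--     n = len(lista)
--     if n == 0:
--         return 0, 0, 0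
--     if n == 1:
--         item = lista[0]
--         return item[0], item[1], item[2]
--     mid = n // 2
--     esq = calcular_total(lista[:mid])
--     dir = calcular_total(lista[mid:])
--     return esq[0] + dir[0], esq[1] + dir[1], esq[2] + dir[2]
-- ===== Notes on version B (the rewrite author's own statement) =====
-- stated objective: alternative
-- what changed: Replaces the single linear loop with three running totals by a divide-and-conquer recursion that splits the list in half, totals each half recursively, and adds the partial triples componentwise.
import Mathlib
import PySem

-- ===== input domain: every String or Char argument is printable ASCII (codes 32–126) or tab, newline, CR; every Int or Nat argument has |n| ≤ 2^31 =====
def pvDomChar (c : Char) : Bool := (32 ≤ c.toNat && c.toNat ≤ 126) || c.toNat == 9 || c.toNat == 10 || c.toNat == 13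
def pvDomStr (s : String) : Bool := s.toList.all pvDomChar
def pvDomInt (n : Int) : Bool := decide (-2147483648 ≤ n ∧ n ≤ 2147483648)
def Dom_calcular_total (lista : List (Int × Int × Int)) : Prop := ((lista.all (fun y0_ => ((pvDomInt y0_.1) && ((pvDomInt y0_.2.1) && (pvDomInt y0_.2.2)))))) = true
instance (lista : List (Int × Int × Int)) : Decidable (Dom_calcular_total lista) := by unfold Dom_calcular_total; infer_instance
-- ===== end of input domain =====

-- B totals the columns by divide-and-conquer (halve, recurse, add triples) instead of A's single accumulator loop (alternative decomposition).

-- ===== PORT A =====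
-- one pass, three running totals carried together
def calcular_total (lista : List (Int × Int × Int)) : Int × Int × Int :=
  lista.foldl (fun acc item => (acc.1 + item.1, acc.2.1 + item.2.1, acc.2.2 + item.2.2)) (0, 0, 0)

-- ===== PORT B =====
-- divide-and-conquer: split in half (lista[:mid] / lista[mid:] ported as take/drop), recurse, add componentwise
def calcular_total_alt (lista : List (Int × Int × Int)) : Int × Int × Int :=
  match lista with
  | [] => (0, 0, 0)
  | [item] => (item.1, item.2.1, item.2.2)
  | x :: y :: tl =>
    let mid := (x :: y :: tl).length / 2
    let esq := calcular_total_alt ((x :: y :: tl).take mid)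
    let dir := calcular_total_alt ((x :: y :: tl).drop mid)
    (esq.1 + dir.1, esq.2.1 + dir.2.1, esq.2.2 + dir.2.2)
termination_by lista.length
decreasing_by
  · simp [List.length_take]; omega
  · simp [List.length_drop]; omega

-- ===== PRECONDITION & SPEC =====
def Spec_calcular_total (lista : List (Int × Int × Int)) (out : Int × Int × Int) : Prop := out = calcular_total_alt lista
instance (lista : List (Int × Int × Int)) (out : Int × Int × Int) : Decidable (Spec_calcular_total lista out) := by unfold Spec_calcular_total; infer_instance

-- ===== CLAIM (what is proved, stated in full; the proofs are below) =====
def Claim_equal_calcular_total : Prop := ∀ (lista : List (Int × Int × Int)), Dom_calcular_total lista → Spec_calcular_total lista (calcular_total lista)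

-- ===== LEMMAS AND PROOFS =====

-- loop invariant for A: the fold from an arbitrary start equals the start plus the column sums
theorem calcular_total_fold_eq (lista : List (Int × Int × Int)) (a b c : Int) :
    lista.foldl (fun acc item => (acc.1 + item.1, acc.2.1 + item.2.1, acc.2.2 + item.2.2)) (a, b, c)
      = (a + (lista.map (fun item => item.1)).sum,
         b + (lista.map (fun item => item.2.1)).sum,
         c + (lista.map (fun item => item.2.2)).sum) := by
  induction lista generalizing a b c with
  | nil => simp
  | cons hd tl ih => simp [List.foldl, ih, add_assoc]

-- B computes the column sums: the halves' sums recombine because list sum splits over take ++ drop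
theorem calcular_total_alt_eq (lista : List (Int × Int × Int)) :
    calcular_total_alt lista
      = ((lista.map (fun item => item.1)).sum,
         (lista.map (fun item => item.2.1)).sum,
         (lista.map (fun item => item.2.2)).sum) := by
  induction lista using calcular_total_alt.induct with
  | case1 => simp [calcular_total_alt]
  | case2 item => simp [calcular_total_alt]
  | case3 x y tl mid ih1 ih2 =>
    have hm : (x :: y :: tl).length / 2 = mid := rfl
    rw [calcular_total_alt]
    simp only [hm, ih1, ih2]
    have h : ∀ (f : Int × Int × Int → Int),
        (((x :: y :: tl).take mid).map f).sum + (((x :: y :: tl).drop mid).map f).sum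
          = ((x :: y :: tl).map f).sum := by
      intro f
      rw [← List.sum_append, ← List.map_append, List.take_append_drop]
    exact Prod.ext (h _) (Prod.ext (h _) (h _))

-- ===== VERDICT (by name: the statement is the Claim_ definition above) =====
theorem calcular_total_spec : Claim_equal_calcular_total := by
  intro lista _
  show _ = _
  simp [calcular_total, calcular_total_alt_eq, calcular_total_fold_eq]
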